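-- pv_equiv track=rewrite | github.com/lucasrodri/apc.t05.2022.2 | Aula07/cripto2.py | encript1
-- ===== SOURCE A (Python) =====
-- def encript1(frase,n,m):
--     frase = frase[::-1]
--     cript = ""
--     for c in frase:
--         if c.isalpha() and c.islower():
--             cod = ord(c)
--             cod += n
--             cript += chr(cod)
--         elif c.isalpha() and c.isupper():
--             cod = ord(c)
--             cod -= m
--             cript += chr(cod)
--         else:
--             cript += c
--     return cript
-- ===== SOURCE B (Python) =====
-- def encript1(frase, n, m):
--     # Build a per-ordinal translation table for the characters actually present,
--     # then do the whole substitution in one str.translate pass over the reversed string.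
--     table = {}
--     for c in set(frase):
--         o = ord(c)
--         if c.isalpha() and c.islower():
--             table[o] = chr(o + n)
--         elif c.isalpha() and c.isupper():
--             table[o] = chr(o - m)
--     return frase[::-1].translate(table)
-- ===== Notes on version B (the rewrite author's own statement) =====
-- stated objective: idiomatic
-- what changed: B precomputes a per-ordinal translation table over set(frase) and applies it in a single str.translate pass over the reversed string, instead of A's per-character branch-and-append loop; Pre_ excludes shifts where chr raises ValueError or yields a lone surrogate (not representable as a Lean Char). (translate avoids quadratic string concatenation and per-char branching)
import Mathlib
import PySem

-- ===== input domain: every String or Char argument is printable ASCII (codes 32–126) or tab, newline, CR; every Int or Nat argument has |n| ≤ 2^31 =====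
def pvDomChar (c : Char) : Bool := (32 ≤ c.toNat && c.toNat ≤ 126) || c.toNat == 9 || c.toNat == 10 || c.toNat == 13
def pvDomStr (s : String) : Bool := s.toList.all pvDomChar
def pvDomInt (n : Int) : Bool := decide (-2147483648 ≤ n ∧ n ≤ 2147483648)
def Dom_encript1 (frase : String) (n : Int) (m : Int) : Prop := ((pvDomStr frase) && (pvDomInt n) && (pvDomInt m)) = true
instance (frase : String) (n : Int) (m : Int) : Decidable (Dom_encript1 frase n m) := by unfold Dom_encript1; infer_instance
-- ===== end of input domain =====

-- B replaces A's per-character branch-and-append loop by a precomputed per-ordinal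
-- translation table over set(frase) applied in one translate pass (objective: idiomatic).


-- chr(k): exact for every k that Pre_encript1 admits (a valid, non-surrogate code point);
-- where Python's chr raises (or yields a lone surrogate, unrepresentable as a Lean Char) Pre_ excludes the input.
def pyChr (k : Int) : Char := Char.ofNat k.toNat

-- ===== PORT A =====
def encript1 (frase : String) (n : Int) (m : Int) : String :=
  -- frase = frase[::-1]; cript = ""; for c in frase: … ; return cript
  String.ofList (((PySem.List.slice? frase.toList none none (-1)).getD []).foldl (fun cript c =>
    if PySem.Chars.isalpha c && PySem.Chars.islower c then
      cript ++ [pyChr ((c.toNat : Int) + n)]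
    else if PySem.Chars.isalpha c && PySem.Chars.isupper c then
      cript ++ [pyChr ((c.toNat : Int) - m)]
    else
      cript ++ [c]) [])

-- ===== PORT B =====
-- the translation-table step: table[ord(c)] = chr(ord(c)±…) for cased letters, else no entry
def pvStep (n m : Int) (d : PySem.Dict Int Char) (c : Char) : PySem.Dict Int Char :=
  if PySem.Chars.isalpha c && PySem.Chars.islower c then
    d.insert (c.toNat : Int) (pyChr ((c.toNat : Int) + n))
  else if PySem.Chars.isalpha c && PySem.Chars.isupper c then
    d.insert (c.toNat : Int) (pyChr ((c.toNat : Int) - m))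
  else
    d

def encript1_alt (frase : String) (n : Int) (m : Int) : String :=
  -- table = {}; for c in set(frase): …   (consumed only by lookups, so set order is immaterial)
  let table : PySem.Dict Int Char :=
    (PySem.Set.ofList frase.toList).foldl (pvStep n m) PySem.Dict.empty
  -- frase[::-1].translate(table): each char maps to table[ord(c)], defaulting to itself
  String.ofList (((PySem.List.slice? frase.toList none none (-1)).getD []).map
    (fun c => table.getD (c.toNat : Int) c))

-- ===== PRECONDITION & SPEC =====
-- k is a valid, non-surrogate code point (chr(k) succeeds and is a Lean Char)
def pvValidCode (k : Int) : Bool := (0 ≤ k && k < 55296) || (57343 < k && k < 1114112)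
-- every cased letter of frase shifts to a valid, non-surrogate code point
def pvOkChar (n m : Int) (c : Char) : Bool :=
  (!(PySem.Chars.isalpha c && PySem.Chars.islower c) || pvValidCode ((c.toNat : Int) + n)) &&
  (!(PySem.Chars.isalpha c && PySem.Chars.isupper c) || pvValidCode ((c.toNat : Int) - m))
-- Pre_ excludes inputs where a shifted code leaves chr's range (A raises ValueError there) and,
-- slightly narrower, the lone-surrogate band U+D800–U+DFFF, where A returns a Python str that
-- has no Lean String counterpart (see claim.json cites).
def Pre_encript1 (frase : String) (n : Int) (m : Int) : Prop :=
  frase.toList.all (pvOkChar n m) = true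
instance (frase : String) (n : Int) (m : Int) : Decidable (Pre_encript1 frase n m) := by
  unfold Pre_encript1; infer_instance
def pvWitness_encript1 : String × Int × Int := ("aB", 1, 1)

def Spec_encript1 (frase : String) (n : Int) (m : Int) (out : String) : Prop := out = encript1_alt frase n m
instance (frase : String) (n : Int) (m : Int) (out : String) : Decidable (Spec_encript1 frase n m out) := by unfold Spec_encript1; infer_instance

-- ===== CLAIM (what is proved, stated in full; the proofs are below) =====
def Claim_equal_encript1 : Prop := ∀ (frase : String) (n : Int) (m : Int), Dom_encript1 frase n m → Pre_encript1 frase n m → Spec_encript1 frase n m (encript1 frase n m)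

-- ===== LEMMAS AND PROOFS =====

-- the per-character result both programs compute
def pvShift (n m : Int) (c : Char) : Char :=
  if PySem.Chars.isalpha c && PySem.Chars.islower c then pyChr ((c.toNat : Int) + n)
  else if PySem.Chars.isalpha c && PySem.Chars.isupper c then pyChr ((c.toNat : Int) - m)
  else c

theorem char_toNat_inj {a b : Char} (h : a.toNat = b.toNat) : a = b := by
  have ha := Char.ofNat_toNat a
  have hb := Char.ofNat_toNat b
  rw [← ha, ← hb, h]

-- one pvStep viewed through a getD at key c.toNat
theorem getD_pvStep (n m : Int) (d : PySem.Dict Int Char) (x c : Char) :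
    (pvStep n m d x).getD (c.toNat : Int) c =
      if c = x ∧ (PySem.Chars.isalpha c && (PySem.Chars.islower c || PySem.Chars.isupper c)) = true
      then pvShift n m c else d.getD (c.toNat : Int) c := by
  by_cases hcx : c = x
  · subst hcx
    unfold pvStep pvShift
    by_cases h1 : (PySem.Chars.isalpha c && PySem.Chars.islower c) = true
    · simp [h1, PySem.Dict.getD_insert_self]
      simp only [Bool.and_eq_true] at h1
      simp [h1.1, h1.2]
    · by_cases h2 : (PySem.Chars.isalpha c && PySem.Chars.isupper c) = true
      · simp [h1, h2, PySem.Dict.getD_insert_self]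
        simp only [Bool.and_eq_true] at h2
        simp [h2.1, h2.2]
      · simp only [Bool.and_eq_true, Bool.or_eq_true] at h1 h2 ⊢
        by_cases ha : PySem.Chars.isalpha c = true <;>
          by_cases hl : PySem.Chars.islower c = true <;>
          by_cases hu : PySem.Chars.isupper c = true <;>
          simp_all
  · have hkey : (c.toNat : Int) ≠ (x.toNat : Int) := by
      intro h
      exact hcx (char_toNat_inj (by exact_mod_cast h))
    unfold pvStep
    split_ifs <;> simp_all [PySem.Dict.getD_insert_of_ne]

-- the whole table-building loop viewed through a getD at key c.toNat
theorem getD_foldl_pvStep (n m : Int) (L : List Char) (c : Char) : ∀ d : PySem.Dict Int Char,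
    (L.foldl (pvStep n m) d).getD (c.toNat : Int) c =
      if c ∈ L ∧ (PySem.Chars.isalpha c && (PySem.Chars.islower c || PySem.Chars.isupper c)) = true
      then pvShift n m c else d.getD (c.toNat : Int) c := by
  induction L with
  | nil => simp
  | cons x xs ih =>
      intro d
      simp only [List.foldl_cons, ih, getD_pvStep, List.mem_cons]
      by_cases hsh : (PySem.Chars.isalpha c && (PySem.Chars.islower c || PySem.Chars.isupper c)) = true
      · by_cases hx : c = x <;> by_cases hxs : c ∈ xs <;> simp_all
      · simp [hsh]
  
-- looking up any character of frase in the finished table yields exactly pvShift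
theorem table_lookup (frase : String) (n m : Int) (c : Char) (hc : c ∈ frase.toList) :
    (((PySem.Set.ofList frase.toList).foldl (pvStep n m) PySem.Dict.empty).getD (c.toNat : Int) c)
      = pvShift n m c := by
  rw [getD_foldl_pvStep]
  by_cases hsh : (PySem.Chars.isalpha c && (PySem.Chars.islower c || PySem.Chars.isupper c)) = true
  · simp [hsh, PySem.Set.mem_ofList, hc]
  · -- c never gets an entry: the default is c, which is pvShift for an uncased c
    simp only [hsh, PySem.Dict.getD_empty]
    unfold pvShift
    simp only [Bool.and_eq_true, Bool.or_eq_true] at hsh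
    by_cases ha : PySem.Chars.isalpha c = true <;>
      by_cases hl : PySem.Chars.islower c = true <;>
      by_cases hu : PySem.Chars.isupper c = true <;>
      simp_all

-- A's append loop is the map of pvShift
theorem encript1_eq_map (frase : String) (n m : Int) :
    encript1 frase n m = String.ofList (((PySem.List.slice? frase.toList none none (-1)).getD []).map (pvShift n m)) := by
  unfold encript1
  congr 1
  have hstep : (fun (cript : List Char) (c : Char) =>
      if PySem.Chars.isalpha c && PySem.Chars.islower c then cript ++ [pyChr ((c.toNat : Int) + n)]
      else if PySem.Chars.isalpha c && PySem.Chars.isupper c then cript ++ [pyChr ((c.toNat : Int) - m)]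
      else cript ++ [c]) = fun cript c => cript ++ [pvShift n m c] := by
    funext cript c
    unfold pvShift
    split_ifs <;> rfl
  rw [hstep, PySem.List.foldl_append_singleton_eq_map]
  simp

-- ===== VERDICT (by name: the statement is the Claim_ definition above) =====
theorem encript1_spec : Claim_equal_encript1 := by
  intro frase n m _ _
  unfold Spec_encript1 encript1_alt
  rw [encript1_eq_map]
  congr 1
  apply List.map_congr_left
  intro c hc
  have hc' : c ∈ frase.toList := by
    rw [PySem.List.slice?_none_none_neg_one] at hc
    simpa using (List.mem_reverse.mp (by simpa using hc))
  rw [table_lookup frase n m c hc']
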